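-- pv_equiv track=rewrite | github.com/1825Vaishnavi/dashcam-anomaly-detection | src/data_processing.py | _dominant_class
-- ===== SOURCE A (Python) =====
-- CATEGORY_MAP = {
--     "car":           "obstacle",
--     "truck":         "obstacle",
--     "bus":           "obstacle",
--     "motor":         "obstacle",
--     "bike":          "obstacle",
--     "trailer":       "obstacle",
--     "pedestrian":    "pedestrian",
--     "rider":         "pedestrian",
--     "traffic light": "traffic_sign",
--     "traffic sign":  "traffic_sign",
--     "lane":          "lane_violation",
--     "other":         "normal",
-- }
--
-- def _dominant_class(frame_labels):
--     priority = ["accident", "pedestrian", "lane_violation",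
--                 "traffic_sign", "obstacle", "normal"]
--     found = set()
--     for obj in frame_labels:
--         cat = obj.get("category", "other").lower()
--         mapped = CATEGORY_MAP.get(cat, "normal")
--         found.add(mapped)
--     for cls in priority:
--         if cls in found:
--             return cls
--     return "normal"
-- ===== SOURCE B (Python) =====
-- CATEGORY_MAP = {
--     "car":           "obstacle",
--     "truck":         "obstacle",
--     "bus":           "obstacle",
--     "motor":         "obstacle",
--     "bike":          "obstacle",
--     "trailer":       "obstacle",
--     "pedestrian":    "pedestrian",
--     "rider":         "pedestrian",
--     "traffic light": "traffic_sign",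
--     "traffic sign":  "traffic_sign",
--     "lane":          "lane_violation",
--     "other":         "normal",
-- }
--
-- def _dominant_class(frame_labels):
--     priority = ["accident", "pedestrian", "lane_violation",
--                 "traffic_sign", "obstacle", "normal"]
--     priority_index = {name: i for i, name in enumerate(priority)}
--     best = len(priority)
--     for obj in frame_labels:
--         cat = obj.get("category", "other").lower()
--         mapped = CATEGORY_MAP.get(cat, "normal")
--         i = priority_index.get(mapped, len(priority))
--         if i < best:
--             best = i
--     return priority[best] if best < len(priority) else "normal"
-- ===== Notes on version B (the rewrite author's own statement) =====
-- stated objective: simpler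
-- what changed: Replaces A's intermediate set of mapped classes plus a second scan over the priority list by a single pass that keeps a running minimum priority index and indexes the priority list once at the end.
import Mathlib
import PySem

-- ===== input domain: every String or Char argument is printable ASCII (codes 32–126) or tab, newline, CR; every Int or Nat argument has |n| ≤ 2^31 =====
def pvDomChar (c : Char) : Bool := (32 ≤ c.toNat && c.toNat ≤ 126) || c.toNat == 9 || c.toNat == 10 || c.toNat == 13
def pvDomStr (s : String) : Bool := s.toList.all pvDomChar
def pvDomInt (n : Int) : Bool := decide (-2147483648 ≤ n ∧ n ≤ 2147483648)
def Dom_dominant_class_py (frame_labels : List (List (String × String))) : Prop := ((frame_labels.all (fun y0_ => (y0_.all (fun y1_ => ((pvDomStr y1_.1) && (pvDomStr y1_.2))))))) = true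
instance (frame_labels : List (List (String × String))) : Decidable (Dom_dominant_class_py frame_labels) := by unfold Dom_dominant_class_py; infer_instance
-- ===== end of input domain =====

-- B replaces A's intermediate set of mapped classes + second priority-scanning loop by a
-- single pass keeping a running minimum priority index (objective: simpler decomposition).

-- ===== PORT A =====
def pvCategoryMap : PySem.Dict String String := PySem.Dict.mk
  [("car", "obstacle"), ("truck", "obstacle"), ("bus", "obstacle"),
   ("motor", "obstacle"), ("bike", "obstacle"), ("trailer", "obstacle"),
   ("pedestrian", "pedestrian"), ("rider", "pedestrian"),
   ("traffic light", "traffic_sign"), ("traffic sign", "traffic_sign"),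
   ("lane", "lane_violation"), ("other", "normal")]

def pvPriority : List String :=
  ["accident", "pedestrian", "lane_violation", "traffic_sign", "obstacle", "normal"]

-- 'for cls in priority: if cls in found: return cls' with the trailing 'return "normal"'
def pvScanA : List String → PySem.Set String → String
  | [], _ => "normal"
  | c :: rest, found => if PySem.Set.contains found c then c else pvScanA rest found

def dominant_class_py (frame_labels : List (List (String × String))) : String :=
  let found : PySem.Set String := frame_labels.foldl
    (fun found obj =>
      let cat := PySem.Str.lower (PySem.Dict.getD (PySem.Dict.mk obj) "category" "other")
      let mapped := PySem.Dict.getD pvCategoryMap cat "normal"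
      PySem.Set.add found mapped)
    PySem.Set.empty
  pvScanA pvPriority found

-- ===== PORT B =====
-- priority_index = {name: i for i, name in enumerate(priority)}
def pvPriorityIndex : PySem.Dict String Int := PySem.Dict.mk
  [("accident", 0), ("pedestrian", 1), ("lane_violation", 2),
   ("traffic_sign", 3), ("obstacle", 4), ("normal", 5)]

def dominant_class_py_alt (frame_labels : List (List (String × String))) : String :=
  let best : Int := frame_labels.foldl
    (fun best obj =>
      let cat := PySem.Str.lower (PySem.Dict.getD (PySem.Dict.mk obj) "category" "other")
      let mapped := PySem.Dict.getD pvCategoryMap cat "normal"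
      let i := PySem.Dict.getD pvPriorityIndex mapped 6
      if i < best then i else best)
    6
  if best < 6 then PySem.List.pyGetD pvPriority best "normal" else "normal"

-- ===== PRECONDITION & SPEC =====
def Spec_dominant_class_py (frame_labels : List (List (String × String))) (out : String) : Prop := out = dominant_class_py_alt frame_labels
instance (frame_labels : List (List (String × String))) (out : String) : Decidable (Spec_dominant_class_py frame_labels out) := by unfold Spec_dominant_class_py; infer_instance

-- ===== CLAIM (what is proved, stated in full; the proofs are below) =====
def Claim_equal_dominant_class_py : Prop := ∀ (frame_labels : List (List (String × String))), Dom_dominant_class_py frame_labels → Spec_dominant_class_py frame_labels (dominant_class_py frame_labels)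

-- ===== LEMMAS AND PROOFS =====

-- the five values CATEGORY_MAP.get can produce
def pvM : List String := ["obstacle", "pedestrian", "traffic_sign", "lane_violation", "normal"]

-- priority[j] for 1 <= j <= 5 (proof-side inverse of pvPriorityIndex)
def pvPr (j : Int) : String :=
  if j = 1 then "pedestrian" else if j = 2 then "lane_violation"
  else if j = 3 then "traffic_sign" else if j = 4 then "obstacle" else "normal"

lemma pvGetD_mem (d : PySem.Dict String String) (k dflt : String) :
    d.getD k dflt = dflt ∨ d.getD k dflt ∈ d.values := by
  rw [PySem.Dict.getD_eq_get?_getD]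
  simp only [PySem.Dict.get?]
  cases h : List.find? (fun p => p.1 == k) d.items with
  | none => left; rfl
  | some p =>
      right
      simp only [Option.map_some, Option.getD_some, PySem.Dict.values]
      exact List.mem_map_of_mem (List.mem_of_find?_eq_some h)

lemma pvMapped_mem (cat : String) : PySem.Dict.getD pvCategoryMap cat "normal" ∈ pvM := by
  have hsub : ∀ v ∈ pvCategoryMap.values, v ∈ pvM := by decide
  rcases pvGetD_mem pvCategoryMap cat "normal" with h | h
  · rw [h]; decide
  · exact hsub _ h

-- loop invariant tying A's set of mapped classes to B's running minimum priority index
def pvInv (found : PySem.Set String) (best : Int) : Prop :=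
  "accident" ∉ found ∧
  ((best = 6 ∧ found = []) ∨
    (1 ≤ best ∧ best < 6 ∧ pvPr best ∈ found ∧
      ∀ j : Int, 1 ≤ j → j < best → pvPr j ∉ found))

lemma pvInv_step_gen (found : PySem.Set String) (best : Int) (m : String) (i : Int)
    (h1i : 1 ≤ i) (h5i : i < 6) (hpm : pvPr i = m) (hmna : m ≠ "accident")
    (hinj : ∀ j : Int, 1 ≤ j → j < i → pvPr j ≠ m) (hinv : pvInv found best) :
    pvInv (PySem.Set.add found m) (if i < best then i else best) := by
  rcases hinv with ⟨hacc, hcase⟩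
  refine ⟨?_, ?_⟩
  · intro hmem
    rcases (PySem.Set.mem_add _ _ _).mp hmem with h | h
    · exact hacc h
    · exact hmna h.symm
  · rcases hcase with ⟨h6, hnil⟩ | ⟨hb1, hb5, hbm, hblt⟩
    · subst hnil
      rw [if_pos (h6 ▸ h5i)]
      refine Or.inr ⟨h1i, h5i, by rw [hpm]; exact (PySem.Set.mem_add _ _ _).mpr (Or.inr rfl), ?_⟩
      intro j hj1 hj2 hmem
      rcases (PySem.Set.mem_add _ _ _).mp hmem with h | h
      · exact (List.not_mem_nil).elim h
      · exact hinj j hj1 hj2 h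
    · by_cases hib : i < best
      · rw [if_pos hib]
        refine Or.inr ⟨h1i, h5i, by rw [hpm]; exact (PySem.Set.mem_add _ _ _).mpr (Or.inr rfl), ?_⟩
        intro j hj1 hj2 hmem
        rcases (PySem.Set.mem_add _ _ _).mp hmem with h | h
        · exact hblt j hj1 (hj2.trans hib) h
        · exact hinj j hj1 hj2 h
      · rw [if_neg hib]
        refine Or.inr ⟨hb1, hb5, (PySem.Set.mem_add _ _ _).mpr (Or.inl hbm), ?_⟩
        intro j hj1 hj2 hmem
        rcases (PySem.Set.mem_add _ _ _).mp hmem with h | h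
        · exact hblt j hj1 hj2 h
        · exact hinj j hj1 (lt_of_lt_of_le hj2 (not_lt.mp hib)) h

lemma pvInv_step (found : PySem.Set String) (best : Int) (m : String)
    (hm : m ∈ pvM) (hinv : pvInv found best) :
    pvInv (PySem.Set.add found m)
      (if PySem.Dict.getD pvPriorityIndex m 6 < best then PySem.Dict.getD pvPriorityIndex m 6 else best) := by
  simp only [pvM, List.mem_cons, List.not_mem_nil, or_false] at hm
  rcases hm with h | h | h | h | h <;> subst h
  · exact pvInv_step_gen found best _ 4 (by decide) (by decide) (by decide) (by decide)
      (fun j hj1 hj2 => by interval_cases j <;> decide) hinv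
  · exact pvInv_step_gen found best _ 1 (by decide) (by decide) (by decide) (by decide)
      (fun j hj1 hj2 => by interval_cases j) hinv
  · exact pvInv_step_gen found best _ 3 (by decide) (by decide) (by decide) (by decide)
      (fun j hj1 hj2 => by interval_cases j <;> decide) hinv
  · exact pvInv_step_gen found best _ 2 (by decide) (by decide) (by decide) (by decide)
      (fun j hj1 hj2 => by interval_cases j <;> decide) hinv
  · exact pvInv_step_gen found best _ 5 (by decide) (by decide) (by decide) (by decide)
      (fun j hj1 hj2 => by interval_cases j <;> decide) hinv

lemma pvInv_final (found : PySem.Set String) (best : Int) (hinv : pvInv found best) :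
    pvScanA pvPriority found =
      (if best < 6 then PySem.List.pyGetD pvPriority best "normal" else "normal") := by
  rcases hinv with ⟨hacc, ⟨h6, hnil⟩ | ⟨hb1, hb5, hbm, hblt⟩⟩
  · subst hnil h6; decide
  · have hj1 := hblt 1 (by decide)
    have hj2 := hblt 2 (by decide)
    have hj3 := hblt 3 (by decide)
    have hj4 := hblt 4 (by decide)
    interval_cases best <;>
      simp_all [pvScanA, pvPriority, pvPr,
        PySem.List.pyGetD, PySem.List.pyGet?, PySem.List.pyIdx?]

lemma pvLoop (L : List (List (String × String))) (found : PySem.Set String) (best : Int)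
    (hinv : pvInv found best) :
    pvScanA pvPriority
      (L.foldl (fun found obj =>
        PySem.Set.add found
          (PySem.Dict.getD pvCategoryMap
            (PySem.Str.lower (PySem.Dict.getD (PySem.Dict.mk obj) "category" "other")) "normal")) found)
    = (let b := L.foldl (fun best obj =>
        let i := PySem.Dict.getD pvPriorityIndex
          (PySem.Dict.getD pvCategoryMap
            (PySem.Str.lower (PySem.Dict.getD (PySem.Dict.mk obj) "category" "other")) "normal") 6
        if i < best then i else best) best
      if b < 6 then PySem.List.pyGetD pvPriority b "normal" else "normal") := by
  induction L generalizing found best with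
  | nil => exact pvInv_final found best hinv
  | cons obj rest ih =>
      simp only [List.foldl_cons]
      exact ih _ _ (pvInv_step _ _ _ (pvMapped_mem _) hinv)

-- ===== VERDICT (by name: the statement is the Claim_ definition above) =====
theorem dominant_class_py_spec : Claim_equal_dominant_class_py := by
  intro L _
  show dominant_class_py L = dominant_class_py_alt L
  unfold dominant_class_py dominant_class_py_alt
  exact pvLoop L PySem.Set.empty 6 ⟨List.not_mem_nil, Or.inl ⟨rfl, rfl⟩⟩
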